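-- pv_equiv track=rewrite | github.com/nsobczak/DirectorySupervisor | main.py | comparateSurveyList
-- ===== SOURCE A (Python) =====
-- def comparateSurveyList(oldListe, newListe):
--     """
-- 	args 2 lists which will be compared
-- 	return 3 lists :
-- 		- for the modified files
-- 		- for the added files
-- 		- for the deleted files
-- 	"""
--     if oldListe == newListe:
--         return None
--     else:
--         listOfSupprFiles = []
--         listOfAddFiles = []
--         listOfModifFiles = []
--         isCreated = [True] * len(newListe)
--         for o in oldListe:
--             isDeleted = True
--             for n in newListe:
--                 nIndex = newListe.index(n)
--                 oName, oTime = o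
--                 nName, nTime = n
--                 if oName == nName:
--                     isDeleted = False
--                     isCreated[nIndex] = False
--                     if oTime != nTime:
--                         listOfModifFiles += [n]
--             if isDeleted:
--                 listOfSupprFiles += [o]
--         for n in newListe:
--             nIndex = newListe.index(n)
--             if isCreated[nIndex]:
--                 listOfAddFiles += [n]
--         return (listOfModifFiles, listOfAddFiles, listOfSupprFiles)
-- ===== SOURCE B (Python) =====
-- def comparateSurveyList(oldListe, newListe):
--     """
-- 	args 2 lists which will be compared
-- 	return 3 lists :
-- 		- for the modified files
-- 		- for the added files
-- 		- for the deleted files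
-- 	"""
--     if oldListe == newListe:
--         return None
--     byName = {}
--     for n in newListe:
--         byName.setdefault(n[0], []).append(n)
--     oldNames = set(o[0] for o in oldListe)
--     listOfModifFiles = [n for o in oldListe for n in byName.get(o[0], []) if n[1] != o[1]]
--     listOfAddFiles = [n for n in newListe if n[0] not in oldNames]
--     listOfSupprFiles = [o for o in oldListe if o[0] not in byName]
--     return (listOfModifFiles, listOfAddFiles, listOfSupprFiles)
-- ===== Notes on version B (the rewrite author's own statement) =====
-- stated objective: faster
-- what changed: Replaces the nested scans with repeated list.index calls and the isCreated flag array by a one-pass name-indexed dict of new entries plus a set of old names; each output list becomes a single comprehension.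
import Mathlib
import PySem

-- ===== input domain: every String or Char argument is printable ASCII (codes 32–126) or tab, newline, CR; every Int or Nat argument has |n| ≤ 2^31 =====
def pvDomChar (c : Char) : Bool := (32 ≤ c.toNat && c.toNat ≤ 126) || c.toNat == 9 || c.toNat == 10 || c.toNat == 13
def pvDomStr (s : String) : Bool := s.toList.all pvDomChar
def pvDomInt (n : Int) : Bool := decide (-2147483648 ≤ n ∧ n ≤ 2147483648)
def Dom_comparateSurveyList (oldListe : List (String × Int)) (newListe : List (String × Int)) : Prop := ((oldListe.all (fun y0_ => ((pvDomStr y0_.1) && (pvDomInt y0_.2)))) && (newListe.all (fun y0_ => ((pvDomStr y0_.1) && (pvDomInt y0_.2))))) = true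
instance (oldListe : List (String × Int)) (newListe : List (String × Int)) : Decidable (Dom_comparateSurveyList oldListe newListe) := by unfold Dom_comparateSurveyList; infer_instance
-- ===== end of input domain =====

-- B replaces A's nested scans with list.index and the isCreated flag array by a one-pass
-- name-indexed dict of new entries plus a set of old names (objective: faster, asymptotic).


-- ===== PORT A =====
-- literal port of A; `newListe.index(n)` always succeeds (n ∈ newListe), so `.getD 0` is an
-- unreachable default, never a substituted value
def pvIdx (newListe : List (String × Int)) (n : String × Int) : Nat :=
  (PySem.List.index? newListe n).getD 0

-- body of A's inner `for n in newListe` loop; state = (isDeleted, isCreated, listOfModifFiles)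
def pvAInnerStep (newListe : List (String × Int)) (o : String × Int)
    (st2 : Bool × List Bool × List (String × Int)) (n : String × Int) :
    Bool × List Bool × List (String × Int) :=
  if o.1 = n.1 then
    (false, st2.2.1.set (pvIdx newListe n) false,
      if o.2 ≠ n.2 then st2.2.2 ++ [n] else st2.2.2)
  else st2

-- body of A's outer `for o in oldListe` loop; state = (listOfSupprFiles, listOfModifFiles, isCreated)
def pvAOuterStep (newListe : List (String × Int))
    (st : List (String × Int) × List (String × Int) × List Bool) (o : String × Int) :
    List (String × Int) × List (String × Int) × List Bool :=
  let inner := newListe.foldl (pvAInnerStep newListe o) (true, st.2.2, st.2.1)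
  (if inner.1 then st.1 ++ [o] else st.1, inner.2.2, inner.2.1)

def comparateSurveyList (oldListe : List (String × Int)) (newListe : List (String × Int)) : Option ((List (String × Int)) × (List (String × Int)) × (List (String × Int))) :=
  if oldListe = newListe then none
  else
    let st := oldListe.foldl (pvAOuterStep newListe) ([], [], List.replicate newListe.length true)
    let listOfAddFiles := newListe.foldl (fun acc n =>
      if st.2.2.getD (pvIdx newListe n) false then acc ++ [n] else acc) []
    some (st.2.1, listOfAddFiles, st.1)

-- ===== PORT B =====
def comparateSurveyList_alt (oldListe : List (String × Int)) (newListe : List (String × Int)) : Option ((List (String × Int)) × (List (String × Int)) × (List (String × Int))) :=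
  if oldListe = newListe then none
  else
    let byName : PySem.Dict String (List (String × Int)) :=
      newListe.foldl (fun d n => d.modify n.1 [] (· ++ [n])) PySem.Dict.empty
    let oldNames : PySem.Set String := PySem.Set.ofList (oldListe.map (·.1))
    let listOfModifFiles := oldListe.flatMap (fun o =>
      (byName.getD o.1 []).filter (fun n => n.2 != o.2))
    let listOfAddFiles := newListe.filter (fun n => !(PySem.Set.contains oldNames n.1))
    let listOfSupprFiles := oldListe.filter (fun o => !(byName.contains o.1))
    some (listOfModifFiles, listOfAddFiles, listOfSupprFiles)

-- ===== PRECONDITION & SPEC =====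
def Spec_comparateSurveyList (oldListe : List (String × Int)) (newListe : List (String × Int)) (out : Option ((List (String × Int)) × (List (String × Int)) × (List (String × Int)))) : Prop := out = comparateSurveyList_alt oldListe newListe
instance (oldListe : List (String × Int)) (newListe : List (String × Int)) (out : Option ((List (String × Int)) × (List (String × Int)) × (List (String × Int)))) : Decidable (Spec_comparateSurveyList oldListe newListe out) := by unfold Spec_comparateSurveyList; infer_instance

-- ===== CLAIM (what is proved, stated in full; the proofs are below) =====
def Claim_equal_comparateSurveyList : Prop := ∀ (oldListe : List (String × Int)) (newListe : List (String × Int)), Dom_comparateSurveyList oldListe newListe → Spec_comparateSurveyList oldListe newListe (comparateSurveyList oldListe newListe)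

-- ===== LEMMAS AND PROOFS =====
theorem pvIdx_spec {newListe : List (String × Int)} {m : String × Int} (hm : m ∈ newListe) :
    ∃ h : pvIdx newListe m < newListe.length, newListe[pvIdx newListe m] = m := by
  have h1 : (PySem.List.index? newListe m).isSome = true :=
    (PySem.List.index?_isSome_iff newListe m).2 hm
  obtain ⟨k, hk⟩ := Option.isSome_iff_exists.1 h1
  obtain ⟨hlt, hget, _⟩ := PySem.List.getElem_of_index?_eq_some hk
  have hidx : pvIdx newListe m = k := by simp only [pvIdx]; rw [hk]; rfl
  rw [hidx]
  exact ⟨hlt, hget⟩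

theorem pvIdx_inj {newListe : List (String × Int)} {m n : String × Int}
    (hm : m ∈ newListe) (hn : n ∈ newListe) (h : pvIdx newListe m = pvIdx newListe n) : m = n := by
  obtain ⟨h1, e1⟩ := pvIdx_spec hm
  obtain ⟨h2, e2⟩ := pvIdx_spec hn
  rw [← e1, ← e2]
  simp [h]
theorem pvInner_fst (newListe : List (String × Int)) (o : String × Int)
    (l : List (String × Int)) (b : Bool) (C : List Bool) (M : List (String × Int)) :
    (l.foldl (pvAInnerStep newListe o) (b, C, M)).1
      = (b && !(l.any (fun n => decide (o.1 = n.1)))) := by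
  induction l generalizing b C M with
  | nil => simp
  | cons x l ih =>
    by_cases h : o.1 = x.1 <;> simp [pvAInnerStep, h, ih]

theorem pvInner_modif (newListe : List (String × Int)) (o : String × Int)
    (l : List (String × Int)) (b : Bool) (C : List Bool) (M : List (String × Int)) :
    (l.foldl (pvAInnerStep newListe o) (b, C, M)).2.2
      = M ++ l.filter (fun n => decide (o.1 = n.1) && decide (o.2 ≠ n.2)) := by
  induction l generalizing b C M with
  | nil => simp
  | cons x l ih =>
    by_cases h : o.1 = x.1
    · by_cases h2 : o.2 ≠ x.2 <;> simp [pvAInnerStep, h, h2, ih]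
    · simp [pvAInnerStep, h, ih]

theorem pvSet_getD_self (C : List Bool) (i : Nat) :
    (C.set i false).getD i false = false := by
  simp [List.getD_eq_getElem?_getD, List.getElem?_set_self']
  cases C[i]? <;> rfl

theorem pvSet_getD_ne (C : List Bool) {i j : Nat} (h : i ≠ j) :
    (C.set j false).getD i false = C.getD i false := by
  simp [List.getD_eq_getElem?_getD, List.getElem?_set_ne (Ne.symm h)]

theorem pvInner_created (newListe : List (String × Int)) (o : String × Int)
    (l : List (String × Int)) (hl : ∀ x ∈ l, x ∈ newListe)
    (b : Bool) (C : List Bool) (M : List (String × Int))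
    (m : String × Int) (hm : m ∈ newListe) :
    (l.foldl (pvAInnerStep newListe o) (b, C, M)).2.1.getD (pvIdx newListe m) false
      = (C.getD (pvIdx newListe m) false && !(decide (m ∈ l) && decide (o.1 = m.1))) := by
  induction l generalizing b C M with
  | nil => simp
  | cons x l ih =>
    have hx : x ∈ newListe := hl x (by simp)
    have hl' : ∀ y ∈ l, y ∈ newListe := fun y hy => hl y (by simp [hy])
    by_cases h : o.1 = x.1
    · rw [List.foldl_cons]
      simp only [pvAInnerStep, if_pos h]
      rw [ih hl']
      by_cases hmx : m = x
      · subst hmx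
        rw [pvSet_getD_self]
        simp [h]
      · have hne : pvIdx newListe m ≠ pvIdx newListe x :=
          fun e => hmx (pvIdx_inj hm hx e)
        rw [pvSet_getD_ne C hne]
        simp [hmx]
    · rw [List.foldl_cons]
      simp only [pvAInnerStep, if_neg h]
      rw [ih hl']
      by_cases hmx : m = x
      · subst hmx; simp [h]
      · simp [hmx]
theorem pvOuter_suppr (newListe oldListe : List (String × Int))
    (S M : List (String × Int)) (C : List Bool) :
    (oldListe.foldl (pvAOuterStep newListe) (S, M, C)).1
      = S ++ oldListe.filter (fun o => !(newListe.any (fun n => decide (o.1 = n.1)))) := by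
  induction oldListe generalizing S M C with
  | nil => simp
  | cons o old ih =>
    rw [List.foldl_cons]
    simp only [pvAOuterStep]
    rw [pvInner_fst]
    by_cases h : newListe.any (fun n => decide (o.1 = n.1)) <;>
      simp [h, ih]

theorem pvOuter_modif (newListe oldListe : List (String × Int))
    (S M : List (String × Int)) (C : List Bool) :
    (oldListe.foldl (pvAOuterStep newListe) (S, M, C)).2.1
      = M ++ oldListe.flatMap
          (fun o => newListe.filter (fun n => decide (o.1 = n.1) && decide (o.2 ≠ n.2))) := by
  induction oldListe generalizing S M C with
  | nil => simp
  | cons o old ih =>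
    rw [List.foldl_cons]
    simp only [pvAOuterStep]
    rw [pvInner_modif]
    simp [ih]

theorem pvOuter_created (newListe oldListe : List (String × Int))
    (S M : List (String × Int)) (C : List Bool)
    (m : String × Int) (hm : m ∈ newListe) :
    (oldListe.foldl (pvAOuterStep newListe) (S, M, C)).2.2.getD (pvIdx newListe m) false
      = (C.getD (pvIdx newListe m) false && !(oldListe.any (fun o => decide (o.1 = m.1)))) := by
  induction oldListe generalizing S M C with
  | nil => simp
  | cons o old ih =>
    rw [List.foldl_cons]
    simp only [pvAOuterStep]
    rw [ih]
    rw [pvInner_created newListe o newListe (fun x hx => hx) true C M m hm]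
    simp [hm]
    by_cases h : o.1 = m.1 <;> simp [h]
theorem pvA_eq (oldListe newListe : List (String × Int)) (hne : oldListe ≠ newListe) :
    comparateSurveyList oldListe newListe
      = some (oldListe.flatMap
            (fun o => newListe.filter (fun n => decide (o.1 = n.1) && decide (o.2 ≠ n.2))),
          newListe.filter (fun n => !(oldListe.any (fun o => decide (o.1 = n.1)))),
          oldListe.filter (fun o => !(newListe.any (fun n => decide (o.1 = n.1))))) := by
  unfold comparateSurveyList
  rw [if_neg hne]
  have hmod := pvOuter_modif newListe oldListe [] [] (List.replicate newListe.length true)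
  have hsup := pvOuter_suppr newListe oldListe [] [] (List.replicate newListe.length true)
  have hadd : (newListe.foldl (fun acc n =>
      if (oldListe.foldl (pvAOuterStep newListe) ([], [], List.replicate newListe.length true)).2.2.getD (pvIdx newListe n) false
      then acc ++ [n] else acc) [])
      = newListe.filter (fun n => !(oldListe.any (fun o => decide (o.1 = n.1)))) := by
    rw [PySem.List.foldl_append_if_eq_filter]
    rw [List.nil_append]
    apply List.filter_congr
    intro n hn
    rw [pvOuter_created newListe oldListe [] [] (List.replicate newListe.length true) n hn]
    have hlt : pvIdx newListe n < newListe.length := (pvIdx_spec hn).1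
    simp [List.getD_eq_getElem?_getD, hlt]
  simp only [hmod, hsup, hadd, List.nil_append]
theorem pvByName_getD (newListe : List (String × Int)) (c : String) :
    (newListe.foldl (fun d n => d.modify n.1 [] (· ++ [n])) PySem.Dict.empty).getD c []
      = newListe.filter (fun n => n.1 == c) := by
  have h : newListe.foldl (fun d n => d.modify n.1 [] (· ++ [n])) PySem.Dict.empty
      = (newListe.map (fun n => (n.1, n))).foldl
          (fun d (p : String × (String × Int)) => d.modify p.1 [] (· ++ [p.2])) PySem.Dict.empty := by
    rw [List.foldl_map]
  rw [h, PySem.Dict.getD_foldl_modify_append]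
  simp [List.filter_map, List.map_map, Function.comp_def]

theorem pvByName_contains (newListe : List (String × Int)) (c : String) :
    (newListe.foldl (fun d n => d.modify n.1 [] (· ++ [n])) PySem.Dict.empty).contains c
      = newListe.any (fun n => n.1 == c) := by
  rw [PySem.Dict.contains_eq_decide_mem_keys]
  rw [PySem.Dict.keys_foldl_modify_key]
  simp [PySem.Set.mem_update, List.any_eq, List.mem_map]
theorem pvDecS (a b : String) : decide (a = b) = (b == a) := by
  by_cases h : a = b
  · subst h; simp
  · simp [h, Ne.symm h]

theorem pvDecI (a b : Int) : decide (a ≠ b) = (b != a) := by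
  by_cases h : a = b
  · subst h; simp
  · simp [h, Ne.symm h]

theorem pvMain (oldListe newListe : List (String × Int)) (hne : oldListe ≠ newListe) :
    comparateSurveyList oldListe newListe = comparateSurveyList_alt oldListe newListe := by
  rw [pvA_eq _ _ hne]
  unfold comparateSurveyList_alt
  rw [if_neg hne]
  simp only [pvByName_getD, pvByName_contains]
  congr 1
  refine Prod.ext ?_ (Prod.ext ?_ ?_)
  · simp only []
    congr 1
    funext o
    rw [List.filter_filter]
    apply List.filter_congr
    intro n _
    rw [pvDecS, pvDecI, Bool.and_comm]
  · simp only []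
    apply List.filter_congr
    intro n _
    have : (PySem.Set.contains (PySem.Set.ofList (oldListe.map (·.1))) n.1)
        = oldListe.any (fun o => decide (o.1 = n.1)) := by
      show (PySem.Set.ofList (oldListe.map (·.1))).contains n.1 = _
      by_cases hmem : n.1 ∈ oldListe.map (·.1)
      · have h1 : (PySem.Set.ofList (oldListe.map (·.1))).contains n.1 = true :=
          List.elem_eq_true_of_mem
            ((PySem.Set.mem_ofList (y := n.1) (xs := oldListe.map (·.1))).2 hmem)
        have h2 : oldListe.any (fun o => decide (o.1 = n.1)) = true := by
          rw [List.any_eq_true]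
          obtain ⟨o, ho, he⟩ := List.mem_map.1 hmem
          exact ⟨o, ho, by simp [he]⟩
        rw [h1, h2]
      · have h1 : (PySem.Set.ofList (oldListe.map (·.1))).contains n.1 = false := by
          have hx : n.1 ∉ PySem.Set.ofList (oldListe.map (·.1)) := fun hc =>
            hmem ((PySem.Set.mem_ofList (y := n.1) (xs := oldListe.map (·.1))).1 hc)
          simpa using hx
        have h2 : oldListe.any (fun o => decide (o.1 = n.1)) = false := by
          rw [List.any_eq_false]
          intro o ho
          simp only [decide_eq_true_eq]
          exact fun he => hmem (List.mem_map.2 ⟨o, ho, he⟩)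
        rw [h1, h2]
    rw [this]
  · simp only []
    apply List.filter_congr
    intro o _
    congr 1
    apply PySem.List.any_congr_mem
    intro n _
    rw [pvDecS]

-- ===== VERDICT (by name: the statement is the Claim_ definition above) =====
theorem comparateSurveyList_spec : Claim_equal_comparateSurveyList := by
  intro oldListe newListe _
  unfold Spec_comparateSurveyList
  by_cases h : oldListe = newListe
  · unfold comparateSurveyList comparateSurveyList_alt
    rw [if_pos h, if_pos h]
  · exact pvMain oldListe newListe h
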